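-- pv_equiv track=rewrite | github.com/joshanashakya/dissertation | workspace/dataset/java-python/GeeksForGeeks/2758/A/2.py | longestFibSubarray
-- ===== SOURCE A (Python) =====
-- def createHash(hash, maxElement) :
--
--     # Insert first two fibnonacci numbers
--     prev = 0
--     curr = 1
--
--     hash.add(prev)
--     hash.add(curr)
--
--     while (curr <= maxElement) :
--
--         # Summation of last two numbers
--         temp = curr + prev
--
--         hash.add(temp)
--
--         # Update the variable each time
--         prev = curr
--         curr = temp
--
-- def longestFibSubarray(arr, n) :
--
--     # Find maximum value in the array
--     max_val = max(arr)
--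
--     # Creating a set
--     # containing Fibonacci numbers
--     hash = {int}
--
--     createHash(hash, max_val)
--
--     left = [ 0 for i in range(n)]
--
--     right = [ 0 for i in range(n)]
--
--     fibcount = 0
--     res = -1
--
--     # Left array is used to count number of
--     # continuous fibonacci numbers starting
--     # from left of current element
--     for i in range(n) :
--
--         left[i] = fibcount
--
--         # Check if current element
--         # is a fibonacci number
--         if (arr[i] in hash) :
--             fibcount += 1
--         else:
--             fibcount = 0
--
--     # Right array is used to count number of
--     # continuous fibonacci numbers starting
--     # from right of current element
--     fibcount = 0
--
--     for i in range(n-1,-1,-1) :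
--
--         right[i] = fibcount
--
--         # Check if current element
--         # is a fibonacci number
--         if (arr[i] in hash) :
--             fibcount += 1
--         else:
--             fibcount = 0
--
--     for i in range(0,n) :
--         res = max(res, left[i] + right[i])
--
--     return res
-- ===== SOURCE B (Python) =====
-- # B: fib candidates built by a recursive list generator; single while-loop pass with
-- # three scalar accumulators replaces A's left/right arrays and three index loops.
-- def fibsAbove(m, prev, cur):
--     if cur > m:
--         return []
--     nxt = prev + cur
--     return [nxt] + fibsAbove(m, cur, nxt)
--
--
-- def longestFibSubarray(arr, n):
--     fibs = [0, 1] + fibsAbove(max(arr), 0, 1)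
--     best = -1
--     before = -1  # fib-run length ending just before the last non-fib seen
--     cur = 0      # current fib-run length
--     i = 0
--     while i < n:
--         if arr[i] in fibs:
--             cur += 1
--             best = max(best, before + cur)
--         else:
--             before = cur
--             cur = 0
--             best = max(best, before)
--         i += 1
--     return best
-- ===== Notes on version B (the rewrite author's own statement) =====
-- stated objective: simpler
-- what changed: Replaces A's set-building while loop, two auxiliary left/right count arrays and three separate index loops by a recursively built Fibonacci list and a single while-loop pass keeping three integers (best, the run length before the last non-Fibonacci element, and the current run length).
import Mathlib
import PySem

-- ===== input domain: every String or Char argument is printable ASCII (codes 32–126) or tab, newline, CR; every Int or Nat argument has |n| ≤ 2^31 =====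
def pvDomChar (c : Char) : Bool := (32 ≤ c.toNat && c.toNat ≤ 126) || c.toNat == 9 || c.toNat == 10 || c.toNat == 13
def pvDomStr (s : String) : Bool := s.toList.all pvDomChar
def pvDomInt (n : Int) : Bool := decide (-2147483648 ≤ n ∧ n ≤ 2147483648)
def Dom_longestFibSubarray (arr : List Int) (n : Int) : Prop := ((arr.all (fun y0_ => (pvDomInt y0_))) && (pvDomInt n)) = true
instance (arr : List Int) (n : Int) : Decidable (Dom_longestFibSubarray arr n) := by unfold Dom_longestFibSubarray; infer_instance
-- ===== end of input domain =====

-- B replaces A's set-building loop, left/right count arrays and three index loops by a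
-- recursively built Fibonacci list and a single while-loop pass with three scalars; return values proved equal.

-- ===== PORT A =====
-- while-loop of createHash; the Prop arguments only justify termination (curr + prev strictly grows)
def createHashLoop (hash : PySem.Set Int) (maxElement prev curr : Int)
    (hp : 0 ≤ prev) (hc : 1 ≤ curr) (hpc : prev ≤ curr) : PySem.Set Int :=
  if h : curr ≤ maxElement then
    createHashLoop (PySem.Set.add hash (curr + prev)) maxElement curr (curr + prev)
      (by omega) (by omega) (by omega)
  else hash
termination_by (2 * maxElement + 3 - (curr + prev)).toNat
decreasing_by omega

-- A's set literal '{int}' holds the type int, which never equals an integer, so it is dropped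
def createHash (hash : PySem.Set Int) (maxElement : Int) : PySem.Set Int :=
  let hash := PySem.Set.add hash 0
  let hash := PySem.Set.add hash 1
  createHashLoop hash maxElement 0 1 (by omega) (by omega) (by omega)

def longestFibSubarray (arr : List Int) (n : Int) : Int :=
  match PySem.List.max? arr (fun x => x) with
  | none => -1   -- dead under Pre_: max(arr) raises ValueError on []
  | some maxVal =>
    let hash := createHash PySem.Set.empty maxVal
    let leftSt := (PySem.List.pyRange 0 n 1).foldl
      (fun (st : List Int × Int) i =>
        (st.1 ++ [st.2],
         if PySem.Set.contains hash (PySem.List.pyGetD arr i 0) then st.2 + 1 else 0))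
      ([], 0)
    let rightSt := (PySem.List.pyRange (n - 1) (-1) (-1)).foldl
      (fun (st : List Int × Int) i =>
        (st.2 :: st.1,
         if PySem.Set.contains hash (PySem.List.pyGetD arr i 0) then st.2 + 1 else 0))
      ([], 0)
    (PySem.List.pyRange 0 n 1).foldl
      (fun res i =>
        max res (PySem.List.pyGetD leftSt.1 i 0 + PySem.List.pyGetD rightSt.1 i 0)) (-1)

-- ===== PORT B =====
-- recursive generator of the Fibonacci numbers above (prev, cur); Props only for termination
def fibsAbove (m prev cur : Int) (hp : 0 ≤ prev) (hc : 1 ≤ cur) (hpc : prev ≤ cur) : List Int :=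
  if h : cur > m then []
  else (prev + cur) :: fibsAbove m cur (prev + cur) (by omega) (by omega) (by omega)
termination_by (2 * m + 3 - (prev + cur)).toNat
decreasing_by omega

-- the while-loop of B: index i, three scalar accumulators
def scanLoop (fibs arr : List Int) (n i best before cur : Int) : Int :=
  if h : i < n then
    if fibs.contains (PySem.List.pyGetD arr i 0) then
      scanLoop fibs arr n (i + 1) (max best (before + (cur + 1))) before (cur + 1)
    else
      scanLoop fibs arr n (i + 1) (max best cur) cur 0
  else best
termination_by (n - i).toNat
decreasing_by all_goals omega

def longestFibSubarray_alt (arr : List Int) (n : Int) : Int :=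
  match PySem.List.max? arr (fun x => x) with
  | none => -1   -- dead under Pre_: max(arr) raises ValueError on []
  | some maxVal =>
    let fibs := 0 :: 1 :: fibsAbove maxVal 0 1 (by omega) (by omega) (by omega)
    scanLoop fibs arr n 0 (-1) (-1) 0

-- ===== PRECONDITION & SPEC =====
-- Pre_ excludes exactly the inputs where A raises: empty arr (max(arr) raises ValueError)
-- and n > len(arr) (arr[i] raises IndexError).
def Pre_longestFibSubarray (arr : List Int) (n : Int) : Prop :=
  arr ≠ [] ∧ n ≤ arr.length
instance (arr : List Int) (n : Int) : Decidable (Pre_longestFibSubarray arr n) := by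
  unfold Pre_longestFibSubarray; infer_instance

def pvWitness_longestFibSubarray : List Int × Int := ([0, 4, 1], 3)

def Spec_longestFibSubarray (arr : List Int) (n : Int) (out : Int) : Prop :=
  out = longestFibSubarray_alt arr n
instance (arr : List Int) (n : Int) (out : Int) : Decidable (Spec_longestFibSubarray arr n out) := by
  unfold Spec_longestFibSubarray; infer_instance

-- ===== CLAIM (what is proved, stated in full; the proofs are below) =====
def Claim_equal_longestFibSubarray : Prop := ∀ (arr : List Int) (n : Int), Dom_longestFibSubarray arr n → Pre_longestFibSubarray arr n → Spec_longestFibSubarray arr n (longestFibSubarray arr n)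

-- ===== LEMMAS AND PROOFS =====

-- A's set-building loop collects exactly the elements B's recursive generator lists
theorem mem_createHashLoop (s : PySem.Set Int) (M p c : Int) (hp : 0 ≤ p) (hc : 1 ≤ c)
    (hpc : p ≤ c) (x : Int) :
    x ∈ createHashLoop s M p c hp hc hpc ↔ x ∈ s ∨ x ∈ fibsAbove M p c hp hc hpc := by
  rw [createHashLoop.eq_def, fibsAbove.eq_def]
  split
  · rename_i hcm
    rw [dif_neg (show ¬ (c > M) by omega)]
    rw [mem_createHashLoop (PySem.Set.add s (c + p)) M c (c + p) (by omega) (by omega) (by omega)]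
    rw [PySem.Set.mem_add]
    simp only [List.mem_cons, show p + c = c + p from by ring]
    tauto
  · rename_i hcm
    rw [dif_pos (show c > M by omega)]
    simp
termination_by (2 * M + 3 - (c + p)).toNat
decreasing_by omega

-- Bool-level: A's set membership test equals B's list membership test
theorem contains_hash_eq (M x : Int) :
    PySem.Set.contains (createHash PySem.Set.empty M) x
      = (0 :: 1 :: fibsAbove M 0 1 (by omega) (by omega) (by omega)).contains x := by
  have h : x ∈ createHash PySem.Set.empty M
      ↔ x ∈ (0 :: 1 :: fibsAbove M 0 1 (by omega) (by omega) (by omega)) := by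
    unfold createHash
    rw [mem_createHashLoop]
    simp [PySem.Set.mem_add, PySem.Set.empty]
    tauto
  rw [Bool.eq_iff_iff, PySem.Set.contains_iff, List.contains_iff_mem]
  exact h

-- abstract boolean-sequence picture: b i = "arr[i] is in the fib set"
def lstep (c : Int) (b : Bool) : Int := if b then c + 1 else 0

def lefts (c : Int) : List Bool → List Int
  | [] => []
  | b :: bs => c :: lefts (lstep c b) bs

def lrun (c : Int) (bs : List Bool) : Int := bs.foldl lstep c

def lead : List Bool → Int
  | [] => 0
  | b :: bs => if b then lead bs + 1 else 0

def leadList : List Bool → List Int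
  | [] => []
  | _ :: bs => lead bs :: leadList bs

def G (a : Int) : List Bool → Int
  | [] => -1
  | b :: bs => max (a + lead bs) (G (lstep a b) bs)

def H : List Bool → Int → Int → Int
  | [], _, _ => -1
  | b :: bs, before, cur =>
      if b then max (before + (cur + 1)) (H bs before (cur + 1))
      else max cur (H bs cur 0)

theorem lead_nonneg (bs : List Bool) : 0 ≤ lead bs := by
  induction bs with
  | nil => simp [lead]
  | cons b bs ih => cases b <;> simp [lead] <;> omega

theorem Gge (a : Int) (bs : List Bool) : -1 ≤ G a bs := by
  induction bs generalizing a with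
  | nil => simp [G]
  | cons b bs ih => simp only [G]; have := ih (lstep a b); omega

theorem Hlead (bs : List Bool) (b c : Int) :
    b + c + lead bs ≤ max (b + c) (H bs b c) := by
  induction bs generalizing b c with
  | nil => simp [H, lead]
  | cons x bs ih =>
    cases x
    · simp only [H, lead, if_neg, Bool.false_eq_true, if_false]
      omega
    · simp only [H, lead, if_pos]
      have := ih b (c + 1)
      omega

theorem dagger (bs : List Bool) (before cur : Int) (hb : -1 ≤ before) (hc : 0 ≤ cur) :
    max (before + cur + lead bs) (H bs before cur)
      = max (before + cur + lead bs) (G cur bs) := by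
  induction bs generalizing before cur with
  | nil => simp [H, G, lead]
  | cons x bs ih =>
    cases x
    · -- false
      have h1 := ih cur 0 (by omega) le_rfl
      have h2 := Hlead bs cur 0
      have h3 := lead_nonneg bs
      simp only [H, G, lead, lstep, Bool.false_eq_true, if_false] at *
      omega
    · -- true
      have h1 := ih before (cur + 1) hb (by omega)
      have h3 := lead_nonneg bs
      simp only [H, G, lead, lstep, if_true] at *
      omega

theorem Glead (bs : List Bool) : lead bs - 1 ≤ max (-1) (G 0 bs) := by
  cases bs with
  | nil => simp [lead]
  | cons x bs =>
    cases x
    · simp only [lead, Bool.false_eq_true, if_false]; omega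
    · simp only [lead, G, if_pos]
      have := Gge (lstep 0 true) bs
      omega

theorem top_eq (bs : List Bool) : max (-1) (H bs (-1) 0) = max (-1) (G 0 bs) := by
  have h1 := dagger bs (-1) 0 (by omega) le_rfl
  have h2 := Hlead bs (-1) 0
  have h3 := Glead bs
  have h4 := lead_nonneg bs
  omega

-- index loop over range(n) reading arr[i]  =  loop over arr.take n
theorem take_map_d (arr : List Int) (d : Int) (n : Nat) (h : n ≤ arr.length) :
    (PySem.List.pyRange 0 (n : Int) 1).map (fun i => PySem.List.pyGetD arr i d)
      = arr.take n := by
  induction n with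
  | zero => simp [PySem.List.pyRange_one_eq_nil]
  | succ m ih =>
    have hm : (((m + 1 : Nat)) : Int) = (m : Int) + 1 := by push_cast; ring
    rw [hm, PySem.List.pyRange_one_succ_right (by positivity), List.map_append, ih (by omega)]
    simp only [List.map_cons, List.map_nil, PySem.List.pyGetD_natCast]
    rw [List.take_succ]
    have hlt : m < arr.length := by omega
    simp [List.getD, List.getElem?_eq_getElem hlt]

-- the left-pass fold produces the list of left counts
theorem leftFold (bs : List Bool) (acc : List Int) (c : Int) :
    bs.foldl (fun (st : List Int × Int) b => (st.1 ++ [st.2], if b then st.2 + 1 else 0)) (acc, c)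
      = (acc ++ lefts c bs, lrun c bs) := by
  induction bs generalizing acc c with
  | nil => simp [lefts, lrun]
  | cons b bs ih =>
    simp only [List.foldl_cons, ih, lefts, lrun, List.foldl_cons, lstep]
    simp

-- the right-pass fold (over the reversed index range) produces the reversed left counts
theorem rightFold (bs : List Bool) (acc : List Int) (c : Int) :
    bs.foldl (fun (st : List Int × Int) b => (st.2 :: st.1, if b then st.2 + 1 else 0)) (acc, c)
      = ((lefts c bs).reverse ++ acc, lrun c bs) := by
  induction bs generalizing acc c with
  | nil => simp [lefts, lrun]
  | cons b bs ih =>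
    simp only [List.foldl_cons, ih, lefts, lrun, List.foldl_cons, List.reverse_cons, lstep]
    simp

theorem lefts_snoc (xs : List Bool) (c : Int) (b : Bool) :
    lefts c (xs ++ [b]) = lefts c xs ++ [lrun c xs] := by
  induction xs generalizing c with
  | nil => simp [lefts, lrun]
  | cons x xs ih => simp [lefts, lrun, ih, List.foldl_cons]

theorem lead_eq_lrun_reverse (bs : List Bool) : lead bs = lrun 0 bs.reverse := by
  induction bs with
  | nil => simp [lead, lrun]
  | cons b bs ih =>
    simp only [List.reverse_cons, lrun, List.foldl_append, List.foldl_cons, List.foldl_nil]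
    rw [lead]
    rw [ih]
    rfl

theorem rights_eq_leadList (bs : List Bool) :
    (lefts 0 bs.reverse).reverse = leadList bs := by
  induction bs with
  | nil => simp [lefts, leadList]
  | cons b bs ih =>
    simp only [List.reverse_cons, lefts_snoc, List.reverse_append, List.reverse_cons,
      List.reverse_nil, List.nil_append, leadList]
    rw [ih, ← lead_eq_lrun_reverse]
    simp

theorem lefts_length (c : Int) (bs : List Bool) : (lefts c bs).length = bs.length := by
  induction bs generalizing c with
  | nil => rfl
  | cons b bs ih => simp [lefts, ih]

theorem leadList_length (bs : List Bool) : (leadList bs).length = bs.length := by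
  induction bs with
  | nil => rfl
  | cons b bs ih => simp [leadList, ih]

-- the third pass over indices is a fold of max over the element-wise sums
theorem sum_map (L R : List Int) (n : Nat) (hL : L.length = n) (hR : R.length = n) :
    (PySem.List.pyRange 0 (n : Int) 1).map
        (fun i => PySem.List.pyGetD L i 0 + PySem.List.pyGetD R i 0)
      = List.zipWith (· + ·) L R := by
  apply List.ext_getElem
  · simp [PySem.List.length_pyRange_one, hL, hR]
  · intro k h1 h2
    have hk : k < n := by
      have := PySem.List.length_pyRange_one (0 : Int) (n : Int)
      simp at h1
      omega
    rw [List.getElem_map, PySem.List.getElem_pyRange_one]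
    have : (0 : Int) + (k : Int) = ((k : Nat) : Int) := by omega
    rw [this, PySem.List.pyGetD_natCast, PySem.List.pyGetD_natCast, List.getElem_zipWith]
    simp [List.getD, List.getElem?_eq_getElem (by omega : k < L.length),
      List.getElem?_eq_getElem (by omega : k < R.length)]

theorem maxFold (bs : List Bool) (a m : Int) (hm : -1 ≤ m) :
    List.foldl max m (List.zipWith (· + ·) (lefts a bs) (leadList bs)) = max m (G a bs) := by
  induction bs generalizing a m with
  | nil => simp [lefts, leadList, G]; omega
  | cons b bs ih =>
    simp only [lefts, leadList, List.zipWith_cons_cons, List.foldl_cons, G]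
    rw [ih (lstep a b) (max m (a + lead bs)) (by omega)]
    omega

-- B's while-loop computes max best (H bs before cur) on the remaining boolean sequence
theorem scanLoop_eq (fibs arr : List Int) (nn : Nat) (hlen : nn ≤ arr.length) :
    ∀ (k j : Nat), nn - j = k → j ≤ nn → ∀ (best before cur : Int), -1 ≤ best →
      scanLoop fibs arr (nn : Int) (j : Int) best before cur
        = max best (H (((arr.drop j).take (nn - j)).map (fun x => fibs.contains x)) before cur) := by
  intro k
  induction k with
  | zero =>
    intro j hk hj best before cur hb
    have hjn : j = nn := by omega
    rw [scanLoop.eq_def, dif_neg (by omega : ¬ ((j : Int) < (nn : Int)))]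
    simp only [hk, List.take_zero, List.map_nil, H]
    omega
  | succ k ih =>
    intro j hk hj best before cur hb
    have hjlt : j < nn := by omega
    have hjarr : j < arr.length := by omega
    rw [scanLoop.eq_def, dif_pos (by exact_mod_cast hjlt)]
    have hget : PySem.List.pyGetD arr (j : Int) 0 = arr[j] := by
      rw [PySem.List.pyGetD_natCast]
      simp [List.getD, List.getElem?_eq_getElem hjarr]
    have hdrop : arr.drop j = arr[j] :: arr.drop (j + 1) := List.drop_eq_getElem_cons hjarr
    have htk : nn - j = (nn - (j + 1)) + 1 := by omega
    rw [hget, hdrop, htk, List.take_succ_cons, List.map_cons]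
    have hcast : ((j : Int) + 1) = ((j + 1 : Nat) : Int) := by push_cast; ring
    by_cases hmem : fibs.contains arr[j]
    · rw [if_pos hmem, hcast,
        ih (j + 1) (by omega) (by omega) (max best (before + (cur + 1))) before (cur + 1) (by omega)]
      simp only [H, hmem, if_pos]
      omega
    · rw [if_neg hmem, hcast,
        ih (j + 1) (by omega) (by omega) (max best cur) cur 0 (by omega)]
      simp only [H, hmem, Bool.false_eq_true, if_false]
      omega

theorem foldl_range_getD {β : Type} (F : β → Int → β) (arr : List Int) (d : Int)
    (nn : Nat) (h : nn ≤ arr.length) (init : β) :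
    (PySem.List.pyRange 0 (nn : Int) 1).foldl
        (fun st i => F st (PySem.List.pyGetD arr i d)) init
      = (arr.take nn).foldl F init := by
  have h1 := (List.foldl_map (f := fun i => PySem.List.pyGetD arr i d) (g := F)
    (l := PySem.List.pyRange 0 (nn : Int) 1) (init := init)).symm
  rw [take_map_d arr d nn h] at h1
  exact h1

theorem foldl_range_rev_getD {β : Type} (F : β → Int → β) (arr : List Int) (d : Int)
    (nn : Nat) (h : nn ≤ arr.length) (init : β) :
    ((PySem.List.pyRange 0 (nn : Int) 1).reverse).foldl
        (fun st i => F st (PySem.List.pyGetD arr i d)) init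
      = ((arr.take nn).reverse).foldl F init := by
  have h1 := (List.foldl_map (f := fun i => PySem.List.pyGetD arr i d) (g := F)
    (l := (PySem.List.pyRange 0 (nn : Int) 1).reverse) (init := init)).symm
  rw [List.map_reverse, take_map_d arr d nn h] at h1
  exact h1

theorem foldl_contains {β : Type} (s : PySem.Set Int) (xs : List Int)
    (F : β → Bool → β) (init : β) :
    xs.foldl (fun st x => F st (PySem.Set.contains s x)) init
      = (xs.map (PySem.Set.contains s)).foldl F init :=
  (List.foldl_map (f := PySem.Set.contains s) (g := F) (l := xs) (init := init)).symm

theorem foldl_range_sum (L R : List Int) (n : Nat) (hL : L.length = n) (hR : R.length = n)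
    (m : Int) :
    (PySem.List.pyRange 0 (n : Int) 1).foldl
        (fun res i => max res (PySem.List.pyGetD L i 0 + PySem.List.pyGetD R i 0)) m
      = List.foldl max m (List.zipWith (· + ·) L R) := by
  have h1 := (List.foldl_map
    (f := fun i => PySem.List.pyGetD L i 0 + PySem.List.pyGetD R i 0) (g := max)
    (l := PySem.List.pyRange 0 (n : Int) 1) (init := m)).symm
  rw [sum_map L R n hL hR] at h1
  exact h1

-- ===== VERDICT (by name: the statement is the Claim_ definition above) =====
theorem longestFibSubarray_spec : Claim_equal_longestFibSubarray := by
  intro arr n _ hpre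
  obtain ⟨hne, hnlen⟩ := hpre
  unfold Spec_longestFibSubarray
  cases hmax : PySem.List.max? arr (fun x => x) with
  | none => exact absurd ((PySem.List.max?_eq_none_iff arr _).mp hmax) hne
  | some m =>
    by_cases hn0 : 0 ≤ n
    · have hnn : ((n.toNat : Nat) : Int) = n := Int.toNat_of_nonneg hn0
      have hlen : n.toNat ≤ arr.length := by omega
      set nn : Nat := n.toNat with hdefnn
      set s : PySem.Set Int := createHash PySem.Set.empty m with hs
      set bs : List Bool := (arr.take nn).map (PySem.Set.contains s) with hbs
      have hbslen : bs.length = nn := by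
        rw [hbs, List.length_map, List.length_take]; omega
      -- evaluate port A
      have hA : longestFibSubarray arr n = max (-1) (G 0 bs) := by
        simp only [longestFibSubarray, hmax]
        rw [← hs, ← hnn]
        rw [foldl_range_getD
          (fun (st : List Int × Int) x =>
            (st.1 ++ [st.2], if PySem.Set.contains s x then st.2 + 1 else 0))
          arr 0 nn hlen ([], 0)]
        rw [PySem.List.pyRange_neg_one_eq_reverse, show (-1 : Int) + 1 = 0 from rfl,
          show ((nn : Int) - 1) + 1 = (nn : Int) from by ring]
        rw [foldl_range_rev_getD
          (fun (st : List Int × Int) x =>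
            (st.2 :: st.1, if PySem.Set.contains s x then st.2 + 1 else 0))
          arr 0 nn hlen ([], 0)]
        rw [foldl_contains s (arr.take nn)
            (fun (st : List Int × Int) b => (st.1 ++ [st.2], if b then st.2 + 1 else 0)) ([], 0),
          foldl_contains s (arr.take nn).reverse
            (fun (st : List Int × Int) b => (st.2 :: st.1, if b then st.2 + 1 else 0)) ([], 0)]
        rw [List.map_reverse, ← hbs]
        rw [leftFold bs [] 0, rightFold bs.reverse [] 0]
        simp only [List.nil_append, List.append_nil]
        rw [rights_eq_leadList]
        rw [foldl_range_sum (lefts 0 bs) (leadList bs) nn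
          (by rw [lefts_length, hbslen]) (by rw [leadList_length, hbslen]) (-1)]
        exact maxFold bs 0 (-1) (by omega)
      -- evaluate port B
      have hB : longestFibSubarray_alt arr n = max (-1) (H bs (-1) 0) := by
        simp only [longestFibSubarray_alt, hmax]
        rw [← hnn]
        have hsc := scanLoop_eq (0 :: 1 :: fibsAbove m 0 1 (by omega) (by omega) (by omega))
          arr nn hlen nn 0 (by omega) (by omega) (-1) (-1) 0 (by omega)
        simp only [Nat.cast_zero, List.drop_zero, Nat.sub_zero] at hsc
        have hmap :
            (arr.take nn).map
                (fun x => (0 :: 1 :: fibsAbove m 0 1 (by omega) (by omega) (by omega)).contains x)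
              = bs := by
          rw [hbs]
          exact List.map_congr_left (fun x _ => (contains_hash_eq m x).symm)
        rw [hmap] at hsc
        exact hsc
      rw [hA, hB, top_eq]
    · -- n < 0: all loops in A run zero times; B's while-loop guard 0 < n fails at once
      simp only [longestFibSubarray, longestFibSubarray_alt, hmax]
      rw [PySem.List.pyRange_one_eq_nil (show n ≤ 0 by omega),
        PySem.List.pyRange_neg_one_eq_nil (show n - 1 ≤ -1 by omega)]
      rw [scanLoop.eq_def, dif_neg (by omega : ¬ ((0 : Int) < n))]
      simp
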